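-- pv_equiv track=rewrite | github.com/TaoziLake/analyzer | unidiff_extract/agent_llm.py | _qualname_suffix_after_module
-- ===== SOURCE A (Python) =====
-- from typing import Dict, List, Optional, Sequence, Tuple
--
-- def _posix(path: str) -> str:
--     return path.replace("\\", "/")
--
-- def _qualname_suffix_after_module(qualname: str, rel_file_path: str, ext: str = ".py") -> List[str]:
--     rel = _posix(rel_file_path)
--     if rel.endswith(ext):
--         rel = rel[: -len(ext)]
--     module_qual = rel.replace("/", ".")
--     if module_qual.endswith(".__init__"):
--         module_qual = module_qual[: -len(".__init__")]
--     if qualname == module_qual: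
--         return []
--     if qualname.startswith(module_qual + "."):
--         tail = qualname[len(module_qual) + 1 :]
--         return [p for p in tail.split(".") if p]
--     qparts = [p for p in qualname.split(".") if p]
--     mparts = [p for p in module_qual.split(".") if p]
--     k = 0
--     while k < min(len(qparts), len(mparts)) and qparts[k] == mparts[k]:
--         k += 1
--     return qparts[k:]
-- ===== SOURCE B (Python) =====
-- def _drop_common(q, m):
--     if q and m and q[0] == m[0]:
--         return _drop_common(q[1:], m[1:])
--     return q
--
-- def _qualname_suffix_after_module(qualname, rel_file_path, ext=".py"):
--     rel = rel_file_path.replace("\\", "/")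
--     if rel.endswith(ext):
--         rel = rel[: -len(ext)]
--     module_qual = rel.replace("/", ".")
--     if module_qual.endswith(".__init__"):
--         module_qual = module_qual[: -len(".__init__")]
--     qparts = [p for p in qualname.split(".") if p]
--     mparts = [p for p in module_qual.split(".") if p]
--     return _drop_common(qparts, mparts)
-- ===== Notes on version B (the rewrite author's own statement) =====
-- stated objective: simpler
-- what changed: B drops A's two string-prefix special-case branches (qualname == module_qual, and startswith(module_qual + '.') with a tail split) and always splits both strings into dot-separated parts, returning the qualname parts after the common leading parts via one recursive common-prefix drop.
import Mathlib
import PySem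

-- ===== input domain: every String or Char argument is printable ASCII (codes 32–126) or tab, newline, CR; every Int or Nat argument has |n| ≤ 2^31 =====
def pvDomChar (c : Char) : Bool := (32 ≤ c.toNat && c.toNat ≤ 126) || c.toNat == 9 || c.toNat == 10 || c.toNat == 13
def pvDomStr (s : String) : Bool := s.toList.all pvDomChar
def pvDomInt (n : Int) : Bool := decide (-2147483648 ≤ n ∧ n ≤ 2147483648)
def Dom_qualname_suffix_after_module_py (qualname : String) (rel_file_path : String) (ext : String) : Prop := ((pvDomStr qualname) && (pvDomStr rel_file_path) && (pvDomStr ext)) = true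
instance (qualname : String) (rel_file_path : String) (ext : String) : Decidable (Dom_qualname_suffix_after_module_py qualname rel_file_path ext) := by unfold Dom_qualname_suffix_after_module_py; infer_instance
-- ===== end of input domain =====

-- B replaces A's two string-prefix special cases (equality / startswith+tail-split) by one uniform
-- token walk that drops the common leading dot-parts; objective: simpler (no speed claim).

-- ===== PORT A =====
-- s.split(".") — sep is nonempty, so Str.split? is always `some`
def pvSplitA (s : String) : List String := (PySem.Str.split? s ".").getD []

-- the `while k < min(...) and qparts[k] == mparts[k]: k += 1` loop followed by `return qparts[k:]`
def pvLoopA (qparts mparts : List String) (k : Nat) : List String :=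
  if h : k < min qparts.length mparts.length ∧ qparts.getD k "" = mparts.getD k "" then
    pvLoopA qparts mparts (k + 1)
  else
    PySem.List.slice qparts (some (k : Int)) none
termination_by min qparts.length mparts.length - k
decreasing_by omega

def qualname_suffix_after_module_py (qualname : String) (rel_file_path : String) (ext : String) : List String :=
  let rel := PySem.Str.replace rel_file_path "\\" "/"
  let rel := if PySem.Str.endswith rel ext then PySem.Str.slice rel none (some (-(PySem.Str.len ext))) else rel
  let module_qual := PySem.Str.replace rel "/" "."
  let module_qual := if PySem.Str.endswith module_qual ".__init__" then PySem.Str.slice module_qual none (some (-(PySem.Str.len ".__init__"))) else module_qual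
  if qualname = module_qual then []
  else if PySem.Str.startswith qualname (module_qual ++ ".") then
    let tail := PySem.Str.slice qualname (some (PySem.Str.len module_qual + 1)) none
    (pvSplitA tail).filter (fun p => p ≠ "")
  else
    let qparts := (pvSplitA qualname).filter (fun p => p ≠ "")
    let mparts := (pvSplitA module_qual).filter (fun p => p ≠ "")
    pvLoopA qparts mparts 0

-- ===== PORT B =====
def pvSplitB (s : String) : List String := (PySem.Str.split? s ".").getD []

def pvDropCommon : List String → List String → List String
  | x :: q, y :: m => if x = y then pvDropCommon q m else x :: q
  | q, _ => q

def qualname_suffix_after_module_py_alt (qualname : String) (rel_file_path : String) (ext : String) : List String :=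
  let rel := PySem.Str.replace rel_file_path "\\" "/"
  let rel := if PySem.Str.endswith rel ext then PySem.Str.slice rel none (some (-(PySem.Str.len ext))) else rel
  let module_qual := PySem.Str.replace rel "/" "."
  let module_qual := if PySem.Str.endswith module_qual ".__init__" then PySem.Str.slice module_qual none (some (-(PySem.Str.len ".__init__"))) else module_qual
  let qparts := (pvSplitB qualname).filter (fun p => p ≠ "")
  let mparts := (pvSplitB module_qual).filter (fun p => p ≠ "")
  pvDropCommon qparts mparts

-- ===== PRECONDITION & SPEC =====
def Spec_qualname_suffix_after_module_py (qualname : String) (rel_file_path : String) (ext : String) (out : List String) : Prop := out = qualname_suffix_after_module_py_alt qualname rel_file_path ext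
instance (qualname : String) (rel_file_path : String) (ext : String) (out : List String) : Decidable (Spec_qualname_suffix_after_module_py qualname rel_file_path ext out) := by unfold Spec_qualname_suffix_after_module_py; infer_instance

-- ===== CLAIM (what is proved, stated in full; the proofs are below) =====
def Claim_equal_qualname_suffix_after_module_py : Prop := ∀ (qualname : String) (rel_file_path : String) (ext : String), Dom_qualname_suffix_after_module_py qualname rel_file_path ext → Spec_qualname_suffix_after_module_py qualname rel_file_path ext (qualname_suffix_after_module_py qualname rel_file_path ext)

-- ===== LEMMAS AND PROOFS =====

-- reference recursion for s.split(".")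
def pvSplitChars : List Char → List (List Char)
  | [] => [[]]
  | c :: rest => if c = '.' then [] :: pvSplitChars rest else (pvSplitChars rest).modifyHead (c :: ·)

theorem pvSplitChars_ne_nil (s : List Char) : pvSplitChars s ≠ [] := by
  cases s with
  | nil => simp [pvSplitChars]
  | cons c rest =>
    simp only [pvSplitChars]
    split_ifs
    · simp
    · intro h
      have := congrArg List.length h
      simp at this
      exact pvSplitChars_ne_nil rest this

theorem modifyHead_modifyHead {α : Type} (f g : α → α) (l : List α) :
    (l.modifyHead g).modifyHead f = l.modifyHead (fun x => f (g x)) := by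
  cases l <;> simp

theorem modifyHead_id_fun {α : Type} (l : List α) : l.modifyHead (fun x => x) = l := by
  cases l <;> simp

theorem splitOn_go_eq (fuel : Nat) (l cur : List Char) (acc : List (List Char))
    (h : l.length < fuel) :
    PySem.Chars.splitOn.go ['.'] fuel l cur acc
      = acc.reverse ++ (pvSplitChars l).modifyHead (fun x => cur.reverse ++ x) := by
  induction fuel generalizing l cur acc with
  | zero => omega
  | succ fuel ih =>
    cases l with
    | nil => simp [PySem.Chars.splitOn.go, pvSplitChars]
    | cons c rest =>
      rw [PySem.Chars.splitOn.go]
      by_cases hc : c = '.'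
      · subst hc
        simp only [List.isPrefixOf, BEq.rfl, Bool.true_and, if_pos]
        rw [ih _ _ _ (by simpa using Nat.lt_of_succ_lt_succ h)]
        simp [pvSplitChars, modifyHead_id_fun]
      · have hpre : ['.'].isPrefixOf (c :: rest) = false := by
          simp [List.isPrefixOf]
          exact fun hh => absurd hh.symm hc
        rw [hpre]
        simp only [Bool.false_eq_true, if_false]
        rw [ih _ _ _ (by simpa using Nat.lt_of_succ_lt_succ h)]
        simp only [pvSplitChars, if_neg hc, modifyHead_modifyHead, List.reverse_cons]
        congr 2
        funext x
        simp

theorem splitOn_dot_eq (s : List Char) : PySem.Chars.splitOn s ['.'] = pvSplitChars s := by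
  unfold PySem.Chars.splitOn
  rw [splitOn_go_eq _ _ _ _ (by omega)]
  simp [modifyHead_id_fun]

theorem pvSplitChars_append (a b : List Char) :
    pvSplitChars (a ++ '.' :: b) = pvSplitChars a ++ pvSplitChars b := by
  induction a with
  | nil => simp [pvSplitChars]
  | cons c a ih =>
    simp only [List.cons_append, pvSplitChars, ih]
    split_ifs
    · simp
    · cases hh : pvSplitChars a with
      | nil => exact absurd hh (pvSplitChars_ne_nil a)
      | cons x xs => simp

theorem pvSplitA_eq (s : String) :
    pvSplitA s = (pvSplitChars s.toList).map String.ofList := by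
  have h : PySem.Chars.split? s.toList ".".toList
      = some (PySem.Chars.splitOn s.toList ['.']) := by
    simp [PySem.Chars.split?]
  have h2 := PySem.Str.split?_map s "."
  rw [h, splitOn_dot_eq] at h2
  unfold pvSplitA
  cases hs : PySem.Str.split? s "." with
  | none => rw [hs] at h2; simp at h2
  | some parts =>
    rw [hs] at h2
    simp only [Option.map_some, Option.some.injEq] at h2
    have h3 := congrArg (List.map String.ofList) h2
    simp only [List.map_map] at h3
    have h4 : List.map (String.ofList ∘ String.toList) parts = parts := by
      simp [Function.comp_def, String.ofList_toList]
    rw [h4] at h3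
    simpa using h3

-- the filtered dot-parts of a string
def pvParts (s : String) : List String :=
  (((pvSplitChars s.toList).map String.ofList).filter (fun p => p ≠ ""))

theorem pvDropCommon_self (l : List String) : pvDropCommon l l = [] := by
  induction l with
  | nil => rfl
  | cons x xs ih => simp [pvDropCommon, ih]

theorem pvDropCommon_append (m t : List String) : pvDropCommon (m ++ t) m = t := by
  induction m with
  | nil => cases t <;> rfl
  | cons x m ih => simp [pvDropCommon, ih]

theorem pvLoopA_eq (qparts mparts : List String) (k : Nat) :
    pvLoopA qparts mparts k = pvDropCommon (qparts.drop k) (mparts.drop k) := by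
  rw [pvLoopA]
  split_ifs with h
  · obtain ⟨hk, heq⟩ := h
    have hq : k < qparts.length := lt_of_lt_of_le hk (Nat.min_le_left _ _)
    have hm : k < mparts.length := lt_of_lt_of_le hk (Nat.min_le_right _ _)
    rw [pvLoopA_eq qparts mparts (k + 1)]
    rw [List.drop_eq_getElem_cons hq, List.drop_eq_getElem_cons hm]
    rw [List.getD_eq_getElem _ _ hq, List.getD_eq_getElem _ _ hm] at heq
    simp [pvDropCommon, heq]
  · rw [PySem.List.slice_from_natCast]
    push Not at h
    by_cases hk : k < min qparts.length mparts.length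
    · have hq : k < qparts.length := lt_of_lt_of_le hk (Nat.min_le_left _ _)
      have hm : k < mparts.length := lt_of_lt_of_le hk (Nat.min_le_right _ _)
      have hne := h hk
      rw [List.getD_eq_getElem _ _ hq, List.getD_eq_getElem _ _ hm] at hne
      rw [List.drop_eq_getElem_cons hq, List.drop_eq_getElem_cons hm]
      simp [pvDropCommon, hne]
    · rcases Nat.lt_or_ge k qparts.length with hq | hq
      · have hm : mparts.length ≤ k := by omega
        rw [List.drop_eq_nil_of_le hm]
        cases hd : qparts.drop k <;> rfl
      · rw [List.drop_eq_nil_of_le hq]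
        cases hd : mparts.drop k <;> rfl
termination_by min qparts.length mparts.length - k
decreasing_by omega

-- main branch analysis, with module_qual generalized
theorem pv_main (q m : String) :
    (if q = m then ([] : List String)
     else if PySem.Str.startswith q (m ++ ".") then
       (pvSplitA (PySem.Str.slice q (some (PySem.Str.len m + 1)) none)).filter (fun p => p ≠ "")
     else
       pvLoopA ((pvSplitA q).filter (fun p => p ≠ "")) ((pvSplitA m).filter (fun p => p ≠ "")) 0)
    = pvDropCommon ((pvSplitB q).filter (fun p => p ≠ "")) ((pvSplitB m).filter (fun p => p ≠ "")) := by
  have hB : ∀ s : String, (pvSplitB s).filter (fun p => p ≠ "") = pvParts s := fun s => by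
    show (pvSplitA s).filter (fun p => p ≠ "") = pvParts s
    rw [pvSplitA_eq]; rfl
  rw [hB, hB]
  split_ifs with h1 h2
  · subst h1
    rw [pvDropCommon_self]
  · -- q = m ++ "." ++ tail
    have hpre : (m ++ ".").toList <+: q.toList := by
      have := (PySem.Chars.startswith_iff q.toList (m ++ ".").toList).mp
        (by simpa using h2)
      exact this
    obtain ⟨t, ht⟩ := hpre
    have hq : q.toList = m.toList ++ '.' :: t := by
      rw [← ht]; simp
    have htail : (PySem.Str.slice q (some (PySem.Str.len m + 1)) none).toList = t := by
      rw [PySem.Str.toList_slice]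
      have hlen : PySem.Str.len m + 1 = ((m.toList.length + 1 : Nat) : Int) := by
        simp only [PySem.Str.len]
        push_cast
        ring
      rw [hlen, PySem.Chars.slice_eq_listSlice, PySem.List.slice_from_natCast, hq]
      have : m.toList ++ '.' :: t = (m.toList ++ ['.']) ++ t := by simp
      rw [this]
      rw [List.drop_left' (by simp)]
    rw [pvSplitA_eq, htail]
    unfold pvParts
    rw [hq, pvSplitChars_append, List.map_append, List.filter_append, pvDropCommon_append]
  · rw [pvLoopA_eq]
    simp only [List.drop_zero]
    congr 1 <;> · rw [pvSplitA_eq]; rfl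

-- ===== VERDICT (by name: the statement is the Claim_ definition above) =====
theorem qualname_suffix_after_module_py_spec : Claim_equal_qualname_suffix_after_module_py := by
  intro qualname rel_file_path ext _
  show qualname_suffix_after_module_py qualname rel_file_path ext
      = qualname_suffix_after_module_py_alt qualname rel_file_path ext
  unfold qualname_suffix_after_module_py qualname_suffix_after_module_py_alt
  exact pv_main qualname _
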